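-- pv_equiv track=rewrite | github.com/cscba0/neolibrary | gdb/lib/tree.py | draw_binary_tree
-- ===== SOURCE A (Python) =====
-- def get_str_with_padding(target, padding):
--     result = ""
--     vec = target.split("\n")
--     pad = " " * padding
--     width = 0
--     for el in vec:
--         width = max(width, len(el))
--     result += f"{pad}┌{'─' * width}┐\n"
--     for el in vec:
--         result += f"{pad}│{el}{' ' * (width - len(el))}│\n"
--     result += f"{pad}└{'─' * width}┘\n"
--     return result
--
-- def draw_binary_tree(data, padding, ind, size):
--     result = ""
--     if ind * 2 < size:
--         result += draw_binary_tree(data, padding, ind * 2, size)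
--     result += get_str_with_padding(data[ind], padding[get_height(ind) - 1])
--     if ind * 2 + 1 < size:
--         result += draw_binary_tree(data, padding, ind * 2 + 1, size)
--     return result
--
-- def get_height(ind):
--     height = 0
--     while ind > 0:
--         ind = ind // 2
--         height += 1
--     return height
-- ===== SOURCE B (Python) =====
-- def get_str_with_padding(target, padding):
--     result = ""
--     vec = target.split("\n")
--     pad = " " * padding
--     width = 0
--     for el in vec:
--         width = max(width, len(el))
--     result += f"{pad}┌{'─' * width}┐\n"
--     for el in vec:
--         result += f"{pad}│{el}{' ' * (width - len(el))}│\n"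
--     result += f"{pad}└{'─' * width}┘\n"
--     return result
--
-- def get_height(ind):
--     height = 0
--     while ind > 0:
--         ind = ind // 2
--         height += 1
--     return height
--
-- def draw_binary_tree(data, padding, ind, size):
--     # iterative in-order traversal with an explicit stack instead of recursion
--     parts = []
--     stack = []
--     node = ind
--     while True:
--         while node * 2 < size:
--             stack.append(node)
--             node = node * 2
--         while True:
--             parts.append(get_str_with_padding(data[node], padding[get_height(node) - 1]))
--             if node * 2 + 1 < size:
--                 node = node * 2 + 1
--                 break
--             if not stack:
--                 return "".join(parts)
--             node = stack.pop()
-- ===== Notes on version B (the rewrite author's own statement) =====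
-- stated objective: alternative
-- what changed: Replaces A's recursion with an iterative in-order traversal using an explicit stack and a parts list joined once at the end, instead of recursive calls concatenating strings.
-- outside the precondition, e.g. on draw_binary_tree(['a', 'b'], [1], 1, 4): A raises IndexError, B raises IndexError; on draw_binary_tree(['a', 'b', 'c'], [], 1, 0): A raises IndexError, B raises IndexError
import Mathlib
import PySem

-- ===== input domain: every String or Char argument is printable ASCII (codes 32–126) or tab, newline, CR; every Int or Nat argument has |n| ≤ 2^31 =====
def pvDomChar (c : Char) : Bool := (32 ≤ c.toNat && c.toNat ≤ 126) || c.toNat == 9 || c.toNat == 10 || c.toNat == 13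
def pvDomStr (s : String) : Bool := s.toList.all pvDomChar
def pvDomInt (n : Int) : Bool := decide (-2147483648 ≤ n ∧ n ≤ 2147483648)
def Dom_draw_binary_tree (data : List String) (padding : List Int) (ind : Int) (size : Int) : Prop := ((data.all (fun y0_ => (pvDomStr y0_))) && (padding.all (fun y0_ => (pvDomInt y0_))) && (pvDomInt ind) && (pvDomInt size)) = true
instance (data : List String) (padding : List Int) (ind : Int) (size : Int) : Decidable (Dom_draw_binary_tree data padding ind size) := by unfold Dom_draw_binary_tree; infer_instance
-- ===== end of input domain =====

-- B replaces A's recursion by an iterative in-order traversal with an explicit stack and a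
-- parts list joined once at the end (objective: alternative decomposition, same output).

-- ===== PORT A =====
-- while ind > 0: ind = ind // 2; height += 1   (exact: PySem.Int.floordiv is Python's //)
def pvGetHeightGo (ind : Int) (height : Int) : Int :=
  if h : 0 < ind then pvGetHeightGo (PySem.Int.floordiv ind 2) (height + 1) else height
termination_by ind.toNat
decreasing_by
  have h1 : PySem.Int.floordiv ind 2 < ind := by
    rw [PySem.Int.floordiv_lt_iff_lt_mul (by norm_num : (0:Int) < 2)]; omega
  have _h2 : (0:Int) ≤ PySem.Int.floordiv ind 2 := by
    rw [PySem.Int.le_floordiv_iff_mul_le (by norm_num : (0:Int) < 2)]; omega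
  omega

def get_height (ind : Int) : Int := pvGetHeightGo ind 0

-- " " * n / "─" * n : empty for n ≤ 0 — exact Python string repetition
def pvRepeatChar (c : Char) (n : Int) : String := String.ofList (List.replicate n.toNat c)

def get_str_with_padding (target : String) (padding : Int) : String :=
  let result : String := ""
  let vec : List String := (PySem.Str.split? target "\n").getD []   -- sep ≠ "" so split? is always some
  let pad : String := pvRepeatChar ' ' padding
  let width : Int := vec.foldl (fun width el => max width (PySem.Str.len el)) 0
  let result := result ++ (pad ++ "┌" ++ pvRepeatChar '─' width ++ "┐\n")
  let result := vec.foldl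
    (fun result el => result ++ (pad ++ "│" ++ el ++ pvRepeatChar ' ' (width - PySem.Str.len el) ++ "│\n")) result
  result ++ (pad ++ "└" ++ pvRepeatChar '─' width ++ "┘\n")

-- data[ind] / padding[get_height(ind)-1]: pyGet? (negative indices from the end);
-- the .getD defaults are unreachable under Pre_ (Python raises IndexError there)
def pvBox (data : List String) (padding : List Int) (node : Int) : String :=
  get_str_with_padding ((PySem.List.pyGet? data node).getD "")
    ((PySem.List.pyGet? padding (get_height node - 1)).getD 0)

-- fuel is a totality gadget only: (size-ind).toNat + 1 exceeds the recursion depth whenever Python A returns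
def pvDrawGo (data : List String) (padding : List Int) (size : Int) : Nat → Int → String
  | 0, _ => ""
  | (f+1), ind =>
    let result : String := ""
    let result := if ind * 2 < size then result ++ pvDrawGo data padding size f (ind * 2) else result
    let result := result ++ pvBox data padding ind
    let result := if ind * 2 + 1 < size then result ++ pvDrawGo data padding size f (ind * 2 + 1) else result
    result

def draw_binary_tree (data : List String) (padding : List Int) (ind : Int) (size : Int) : String :=
  pvDrawGo data padding size ((size - ind).toNat + 1) ind

-- ===== PORT B =====
-- the two inner while-loops of Source B; the Python list 'stack' (append/pop at the end) is a Lean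
-- list with its head as top of stack; fuel is a totality gadget, never exhausted where Python B returns
mutual
def pvDescend (data : List String) (padding : List Int) (size : Int) :
    Nat → List Int → Int → List String → Option (List String)
  | 0, _, _, _ => none
  | (f+1), stack, node, parts =>
    if node * 2 < size then pvDescend data padding size f (node :: stack) (node * 2) parts
    else pvEmit data padding size f stack node parts

def pvEmit (data : List String) (padding : List Int) (size : Int) :
    Nat → List Int → Int → List String → Option (List String)
  | 0, _, _, _ => none
  | (f+1), stack, node, parts =>
    let parts := parts ++ [pvBox data padding node]
    if node * 2 + 1 < size then pvDescend data padding size f stack (node * 2 + 1) parts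
    else
      match stack with
      | [] => some parts
      | s :: rest => pvEmit data padding size f rest s parts
end

def pvFuelB (ind : Int) (size : Int) : Nat := 2 * 3 ^ (size - ind).toNat + 2

def draw_binary_tree_alt (data : List String) (padding : List Int) (ind : Int) (size : Int) : String :=
  match pvDescend data padding size (pvFuelB ind size) [] ind [] with
  | some parts => PySem.Str.join "" parts
  | none => ""

-- ===== PRECONDITION & SPEC =====
-- (ind+1)*2^K where K is the largest k with ind*2^k < size: one past the largest heap index
-- A's traversal can visit below ind.  Fuel 64 suffices for every |size| ≤ 2^31 input of Dom.
def pvLevHi (size : Int) : Nat → Int → Int → Int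
  | 0, _, hi => hi
  | (f+1), lo, hi => if 1 ≤ lo ∧ lo * 2 < size then pvLevHi size f (lo * 2) (hi * 2) else hi

-- Pre_ = exactly the inputs where Python A returns: every visited index is a valid data index and
-- its height a valid padding index (root may be ≤ 0: then A reads data[ind]/padding[-1] by Python's
-- negative-index rule and recurses only if ind*2 < size, which for ind ≤ 0 never terminates).
def Pre_draw_binary_tree (data : List String) (padding : List Int) (ind : Int) (size : Int) : Prop :=
  (-(data.length : Int) ≤ ind ∧ ind < data.length) ∧
  (1 ≤ ind → ind < (2 : Int) ^ padding.length) ∧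
  (ind ≤ 0 → 1 ≤ padding.length) ∧
  (ind * 2 < size →
    1 ≤ ind ∧
      min size (pvLevHi size 64 ind (ind + 1)) - 1 <
        min (data.length : Int) ((2 : Int) ^ padding.length))

instance (data : List String) (padding : List Int) (ind : Int) (size : Int) :
    Decidable (Pre_draw_binary_tree data padding ind size) := by
  unfold Pre_draw_binary_tree; infer_instance

def pvWitness_draw_binary_tree : List String × List Int × Int × Int := (["a", "b", "c"], [0, 1], 1, 3)

def Spec_draw_binary_tree (data : List String) (padding : List Int) (ind : Int) (size : Int) (out : String) : Prop := out = draw_binary_tree_alt data padding ind size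
instance (data : List String) (padding : List Int) (ind : Int) (size : Int) (out : String) : Decidable (Spec_draw_binary_tree data padding ind size out) := by unfold Spec_draw_binary_tree; infer_instance

-- ===== CLAIM (what is proved, stated in full; the proofs are below) =====
def Claim_equal_draw_binary_tree : Prop := ∀ (data : List String) (padding : List Int) (ind : Int) (size : Int), Dom_draw_binary_tree data padding ind size → Pre_draw_binary_tree data padding ind size → Spec_draw_binary_tree data padding ind size (draw_binary_tree data padding ind size)

-- ===== LEMMAS AND PROOFS =====

-- the in-order list of boxes of the subtree rooted at ind (a specification object, used by no port)
def pvPieces (data : List String) (padding : List Int) (size : Int) (ind : Int) : List String :=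
  (if h : 1 ≤ ind ∧ ind * 2 < size then pvPieces data padding size (ind * 2) else []) ++
  [pvBox data padding ind] ++
  (if h : 1 ≤ ind ∧ ind * 2 + 1 < size then pvPieces data padding size (ind * 2 + 1) else [])
termination_by (size - ind).toNat
decreasing_by all_goals omega

-- exact number of machine steps B takes on the subtree rooted at ind
def pvT (size : Int) (ind : Int) : Nat :=
  2 + (if h : 1 ≤ ind ∧ ind * 2 < size then pvT size (ind * 2) else 0) +
      (if h : 1 ≤ ind ∧ ind * 2 + 1 < size then pvT size (ind * 2 + 1) else 0)
termination_by (size - ind).toNat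
decreasing_by all_goals omega

theorem pvInterspFlat (l : List (List Char)) :
    (List.intersperse ([] : List Char) l).flatten = l.flatten := by
  induction l with
  | nil => rfl
  | cons x xs ih =>
    cases xs with
    | nil => rfl
    | cons y ys =>
      have h : List.intersperse ([] : List Char) (x :: y :: ys)
          = x :: [] :: List.intersperse [] (y :: ys) := rfl
      rw [h, List.flatten_cons, List.flatten_cons, ih, List.flatten_cons]
      simp

theorem pvJoin_nil : PySem.Str.join "" [] = "" := by rfl

theorem pvJoin_cons (x : String) (l : List String) :
    PySem.Str.join "" (x :: l) = x ++ PySem.Str.join "" l := by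
  apply String.toList_inj.mp
  simp [PySem.Str.join, PySem.Chars.join, List.intercalate, pvInterspFlat]

theorem pvJoin_append (l1 l2 : List String) :
    PySem.Str.join "" (l1 ++ l2) = PySem.Str.join "" l1 ++ PySem.Str.join "" l2 := by
  induction l1 with
  | nil => simp [pvJoin_nil]
  | cons x xs ih => simp [pvJoin_cons, ih, String.append_assoc]

theorem pvGoA_eq (data : List String) (padding : List Int) (size : Int) :
    ∀ (f : Nat) (ind : Int), 1 ≤ ind → (size - ind).toNat < f →
      pvDrawGo data padding size f ind = PySem.Str.join "" (pvPieces data padding size ind) := by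
  intro f
  induction f with
  | zero => intro ind h1 h2; omega
  | succ f ih =>
    intro ind h1 h2
    rw [pvPieces]
    simp only [pvDrawGo]
    by_cases hl : ind * 2 < size
    · rw [if_pos hl, dif_pos ⟨h1, hl⟩, ih (ind * 2) (by omega) (by omega)]
      by_cases hr : ind * 2 + 1 < size
      · rw [if_pos hr, dif_pos ⟨h1, hr⟩, ih (ind * 2 + 1) (by omega) (by omega)]
        simp [pvJoin_append, pvJoin_cons, String.append_assoc]
      · rw [if_neg hr, dif_neg (fun hc => hr hc.2)]
        simp [pvJoin_append, pvJoin_cons, pvJoin_nil]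
    · rw [if_neg hl, dif_neg (fun hc => hl hc.2)]
      by_cases hr : ind * 2 + 1 < size
      · rw [if_pos hr, dif_pos ⟨h1, hr⟩, ih (ind * 2 + 1) (by omega) (by omega)]
        simp [pvJoin_cons]
      · rw [if_neg hr, dif_neg (fun hc => hr hc.2)]
        simp [pvJoin_cons, pvJoin_nil]

def pvPopK (data : List String) (padding : List Int) (size : Int)
    (f : Nat) (stack : List Int) (parts : List String) : Option (List String) :=
  match stack with
  | [] => some parts
  | s :: rest => pvEmit data padding size f rest s parts

theorem pvDescend_eq (data : List String) (padding : List Int) (size : Int) :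
    ∀ (n : Nat) (ind : Int), (size - ind).toNat ≤ n → 1 ≤ ind →
      ∀ (stack : List Int) (parts : List String) (f : Nat),
        pvDescend data padding size (pvT size ind + f) stack ind parts
          = pvPopK data padding size f stack (parts ++ pvPieces data padding size ind) := by
  intro n
  induction n with
  | zero =>
    intro ind hn h1 stack parts f
    have hl : ¬ ind * 2 < size := by omega
    have hr : ¬ ind * 2 + 1 < size := by omega
    have hT : pvT size ind + f = (f + 1) + 1 := by
      rw [pvT, dif_neg (fun hc => hl hc.2), dif_neg (fun hc => hr hc.2)]; omega
    rw [hT]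
    simp only [pvDescend]
    rw [if_neg hl]
    simp only [pvEmit]
    rw [if_neg hr, pvPieces, dif_neg (fun hc => hl hc.2), dif_neg (fun hc => hr hc.2)]
    cases stack <;> simp [pvPopK]
  | succ n ih =>
    intro ind hn h1 stack parts f
    by_cases hl : ind * 2 < size
    · by_cases hr : ind * 2 + 1 < size
      · -- both children
        have hT : pvT size ind + f
            = (pvT size (ind * 2) + (pvT size (ind * 2 + 1) + 1 + f)) + 1 := by
          rw [pvT, dif_pos ⟨h1, hl⟩, dif_pos ⟨h1, hr⟩]; omega
        rw [hT]
        simp only [pvDescend]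
        rw [if_pos hl, ih (ind * 2) (by omega) (by omega)]
        simp only [pvPopK]
        have h2 : pvT size (ind * 2 + 1) + 1 + f = (pvT size (ind * 2 + 1) + f) + 1 := by omega
        rw [h2]
        simp only [pvEmit]
        rw [if_pos hr, ih (ind * 2 + 1) (by omega) (by omega)]
        conv_rhs => rw [pvPieces, dif_pos ⟨h1, hl⟩, dif_pos ⟨h1, hr⟩]
        cases stack <;> simp [pvPopK, List.append_assoc]
      · -- left child only
        have hT : pvT size ind + f = (pvT size (ind * 2) + (1 + f)) + 1 := by
          rw [pvT, dif_pos ⟨h1, hl⟩, dif_neg (fun hc => hr hc.2)]; omega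
        rw [hT]
        simp only [pvDescend]
        rw [if_pos hl, ih (ind * 2) (by omega) (by omega)]
        simp only [pvPopK]
        have h2 : 1 + f = f + 1 := by omega
        rw [h2]
        simp only [pvEmit]
        rw [if_neg hr]
        conv_rhs => rw [pvPieces, dif_pos ⟨h1, hl⟩, dif_neg (fun hc => hr hc.2)]
        cases stack <;> simp
    · by_cases hr : ind * 2 + 1 < size
      · -- right child only
        have hT : pvT size ind + f = ((pvT size (ind * 2 + 1) + f) + 1) + 1 := by
          rw [pvT, dif_neg (fun hc => hl hc.2), dif_pos ⟨h1, hr⟩]; omega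
        rw [hT]
        simp only [pvDescend]
        rw [if_neg hl]
        simp only [pvEmit]
        rw [if_pos hr, ih (ind * 2 + 1) (by omega) (by omega)]
        conv_rhs => rw [pvPieces, dif_neg (fun hc => hl hc.2), dif_pos ⟨h1, hr⟩]
        cases stack <;> simp [pvPopK, List.append_assoc]
      · -- leaf
        have hT : pvT size ind + f = (f + 1) + 1 := by
          rw [pvT, dif_neg (fun hc => hl hc.2), dif_neg (fun hc => hr hc.2)]; omega
        rw [hT]
        simp only [pvDescend]
        rw [if_neg hl]
        simp only [pvEmit]
        rw [if_neg hr, pvPieces, dif_neg (fun hc => hl hc.2), dif_neg (fun hc => hr hc.2)]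
        cases stack <;> simp [pvPopK]

theorem pvT_le (size : Int) : ∀ (n : Nat) (ind : Int), (size - ind).toNat ≤ n → 1 ≤ ind →
    pvT size ind ≤ 2 * 3 ^ n := by
  intro n
  induction n with
  | zero =>
    intro ind hn h1
    rw [pvT, dif_neg (fun hc => by omega : ¬ (1 ≤ ind ∧ ind * 2 < size)),
      dif_neg (fun hc => by omega : ¬ (1 ≤ ind ∧ ind * 2 + 1 < size))]
    norm_num
  | succ n ih =>
    intro ind hn h1
    rw [pvT, pow_succ]
    have hk : 1 ≤ 3 ^ n := Nat.one_le_pow _ _ (by norm_num)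
    by_cases hl : ind * 2 < size <;> by_cases hr : ind * 2 + 1 < size
    · rw [dif_pos ⟨h1, hl⟩, dif_pos ⟨h1, hr⟩]
      have a1 := ih (ind * 2) (by omega) (by omega)
      have a2 := ih (ind * 2 + 1) (by omega) (by omega)
      omega
    · rw [dif_pos ⟨h1, hl⟩, dif_neg (fun hc => hr hc.2)]
      have a1 := ih (ind * 2) (by omega) (by omega)
      omega
    · rw [dif_neg (fun hc => hl hc.2), dif_pos ⟨h1, hr⟩]
      have a2 := ih (ind * 2 + 1) (by omega) (by omega)
      omega
    · rw [dif_neg (fun hc => hl hc.2), dif_neg (fun hc => hr hc.2)]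
      omega

theorem pvMain (data : List String) (padding : List Int) (ind : Int) (size : Int) :
    Pre_draw_binary_tree data padding ind size →
    draw_binary_tree data padding ind size = draw_binary_tree_alt data padding ind size := by
  intro hpre
  obtain ⟨hroot, hh1, hh0, hrec⟩ := hpre
  by_cases hl : ind * 2 < size
  · obtain ⟨h1, -⟩ := hrec hl
    have hA : draw_binary_tree data padding ind size
        = PySem.Str.join "" (pvPieces data padding size ind) :=
      pvGoA_eq data padding size _ ind h1 (by omega)
    have hTle : pvT size ind ≤ 2 * 3 ^ (size - ind).toNat := pvT_le size _ ind le_rfl h1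
    have hFuel : pvFuelB ind size = pvT size ind + (pvFuelB ind size - pvT size ind) := by
      unfold pvFuelB; omega
    have hB : pvDescend data padding size (pvFuelB ind size) [] ind []
        = some (pvPieces data padding size ind) := by
      rw [hFuel, pvDescend_eq data padding size _ ind le_rfl h1]
      simp [pvPopK]
    rw [hA]
    unfold draw_binary_tree_alt
    rw [hB]
  · have hr : ¬ ind * 2 + 1 < size := by omega
    unfold draw_binary_tree
    simp only [pvDrawGo]
    rw [if_neg hl, if_neg hr]
    unfold draw_binary_tree_alt pvFuelB
    have hF : 2 * 3 ^ (size - ind).toNat + 2 = (2 * 3 ^ (size - ind).toNat + 1) + 1 := by omega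
    rw [hF]
    simp only [pvDescend]
    rw [if_neg hl]
    have hF2 : 2 * 3 ^ (size - ind).toNat + 1 = (2 * 3 ^ (size - ind).toNat) + 1 := rfl
    simp only [pvEmit]
    rw [if_neg hr]
    simp [pvJoin_cons, pvJoin_nil]

-- ===== VERDICT (by name: the statement is the Claim_ definition above) =====
theorem draw_binary_tree_spec : Claim_equal_draw_binary_tree := by
  intro data padding ind size _hdom hpre
  show draw_binary_tree data padding ind size = draw_binary_tree_alt data padding ind size
  exact pvMain data padding ind size hpre
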